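-- pv_equiv track=rewrite | github.com/john35452/GFG_Weekly_Coding_Contest | gfg-weekly-coding-contest-103/K-periodic Circular String.py | kPeriodic
-- ===== SOURCE A (Python) =====
-- def kPeriodic(s, K):
--     #code here
--     import math
--     from collections import Counter
--     n = len(s)
--     fre = Counter(s)
--     group_count = math.gcd(n, K)
--     item_count = n // group_count
--     for _, v in fre.items():
--         if v % item_count > 0:
--             return "-1"
--     keys = sorted(fre.keys())
--     ans = [""]*n
--     i = 0
--     for c in sorted(fre.keys()):
--         while fre[c] > 0:
--             for s in range(item_count):
--                 ans[i + s * group_count] = c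
--             fre[c] -= item_count
--             i += 1
--     return ''.join(ans)
-- ===== SOURCE B (Python) =====
-- def kPeriodic(s, K):
--     import math
--     from collections import Counter
--     n = len(s)
--     fre = Counter(s)
--     group_count = math.gcd(n, K)
--     item_count = n // group_count
--     if any(v % item_count for v in fre.values()):
--         return "-1"
--     cols = []
--     for c in sorted(fre):
--         cols.extend([c] * (fre[c] // item_count))
--     return ''.join(cols[p % group_count] for p in range(n))
-- ===== Notes on version B (the rewrite author's own statement) =====
-- stated objective: simpler
-- what changed: Replaces A's nested while-loop strided scatter into a preallocated mutable array by a flat per-column character table built once in sorted order, read back with a single modulo-indexed forward pass.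
import Mathlib
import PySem

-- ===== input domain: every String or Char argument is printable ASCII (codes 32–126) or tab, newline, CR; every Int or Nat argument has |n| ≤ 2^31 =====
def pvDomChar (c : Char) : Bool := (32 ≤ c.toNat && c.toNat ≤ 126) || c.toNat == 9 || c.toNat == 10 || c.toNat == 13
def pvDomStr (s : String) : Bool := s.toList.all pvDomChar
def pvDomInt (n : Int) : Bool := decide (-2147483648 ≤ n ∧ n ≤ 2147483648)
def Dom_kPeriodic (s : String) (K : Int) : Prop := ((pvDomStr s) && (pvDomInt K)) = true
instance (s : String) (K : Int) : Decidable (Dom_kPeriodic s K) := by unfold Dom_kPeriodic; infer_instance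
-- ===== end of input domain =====

-- B replaces A's nested strided-scatter writes into a preallocated array by a flat per-column
-- table built once in sorted order plus a single modulo-indexed forward read (objective: simpler).

-- ===== PORT A =====
-- inner `for s in range(item_count): ans[i + s*group_count] = c` (the written index is always
-- in range when this line is reached)
def pvWriteCol (gc ic : Int) (a : List (List Char)) (i : Int) (c : Char) : List (List Char) :=
  (PySem.List.pyRange 0 ic 1).foldl (fun a s0 => PySem.List.pySetD a (i + s0 * gc) [c]) a

-- `while fre[c] > 0: …; fre[c] -= item_count; i += 1`, with v tracking fre[c]; the fuel bounds
-- the iteration count (each pass needs v > 0 and lowers v by item_count, which is ≥ 1 when reached)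
def pvScatter (gc ic : Int) (c : Char) : Nat → Int → List (List Char) → Int → List (List Char) × Int
  | 0, _, ans, i => (ans, i)
  | f + 1, v, ans, i =>
    if 0 < v then pvScatter gc ic c f (v - ic) (pvWriteCol gc ic ans i c) (i + 1)
    else (ans, i)

def kPeriodic (s : String) (K : Int) : String :=
  let cs := s.toList
  let n : Int := cs.length
  let fre := PySem.Dict.counter cs
  let group_count : Int := Int.gcd n K
  let item_count : Int := PySem.Int.floordiv n group_count  -- ZeroDivisionError iff s = "" ∧ K = 0 (outside Pre_)
  -- `for _, v in fre.items(): if v % item_count > 0: return "-1"` — early-return scan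
  if (fre.items).any (fun kv => 0 < PySem.Int.mod kv.2 item_count) then "-1"
  else
    let ans : List (List Char) := List.replicate cs.length []  -- [""]*n; entries are "" or a 1-char string
    let st := (PySem.List.sorted fre.keys (fun c => c) false).foldl
      (fun (st : List (List Char) × Int) c =>
        pvScatter group_count item_count c (fre.getD c 0).toNat (fre.getD c 0) st.1 st.2)
      (ans, 0)
    String.ofList st.1.flatten  -- ''.join(ans)

-- ===== PORT B =====
def kPeriodic_alt (s : String) (K : Int) : String :=
  let cs := s.toList
  let n : Int := cs.length
  let fre := PySem.Dict.counter cs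
  let group_count : Int := Int.gcd n K
  let item_count : Int := PySem.Int.floordiv n group_count  -- ZeroDivisionError iff s = "" ∧ K = 0 (outside Pre_)
  if (fre.values).any (fun v => PySem.Int.mod v item_count != 0) then "-1"
  else
    let cols : List Char := (PySem.List.sorted fre.keys (fun c => c) false).foldl
      (fun acc c => acc ++ List.replicate (PySem.Int.floordiv (fre.getD c 0) item_count).toNat c) []
    -- ''.join(cols[p % group_count] for p in range(n)); the index is always in range when reached
    String.ofList ((PySem.List.pyRange 0 n 1).map
      (fun p => PySem.List.pyGetD cols (PySem.Int.mod p group_count) ' '))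

-- ===== PRECONDITION & SPEC =====
-- Pre_ excludes only s = "" with K = 0, where the Python A (and B alike) raises ZeroDivisionError
-- computing n // math.gcd(n, K) = 0 // 0.
def Pre_kPeriodic (s : String) (K : Int) : Prop := s ≠ "" ∨ K ≠ 0
instance (s : String) (K : Int) : Decidable (Pre_kPeriodic s K) := by unfold Pre_kPeriodic; infer_instance
def pvWitness_kPeriodic : String × Int := ("aabbbb", 4)

def Spec_kPeriodic (s : String) (K : Int) (out : String) : Prop := out = kPeriodic_alt s K
instance (s : String) (K : Int) (out : String) : Decidable (Spec_kPeriodic s K out) := by unfold Spec_kPeriodic; infer_instance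

-- ===== CLAIM (what is proved, stated in full; the proofs are below) =====
def Claim_equal_kPeriodic : Prop := ∀ (s : String) (K : Int), Dom_kPeriodic s K → Pre_kPeriodic s K → Spec_kPeriodic s K (kPeriodic s K)

-- ===== LEMMAS AND PROOFS =====

-- A's whole scatter phase, one column at a time: write char c to every slot p ≡ i (mod gc), then i += 1
def pvWriteAll (gc ic : Int) : List Char → List (List Char) → Int → List (List Char)
  | [], a, _ => a
  | c :: cs, a, i => pvWriteAll gc ic cs (pvWriteCol gc ic a i c) (i + 1)

theorem pv_setD_getElem? (xs : List (List Char)) (q : Int) (v : List Char) (p : Nat)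
    (h0 : 0 ≤ q) (h1 : q < xs.length) :
    (PySem.List.pySetD xs q v)[p]? = if (p : Int) = q then some v else xs[p]? := by
  simp only [PySem.List.pySetD, PySem.List.pySet?, PySem.List.pyIdx?, if_pos h0, if_pos h1,
    Option.map_some, Option.getD_some]
  rw [List.getElem?_set]
  by_cases h : (p : Int) = q
  · have : q.toNat = p := by omega
    simp [this, h, show p < xs.length by omega]
  · have : q.toNat ≠ p := by omega
    simp [this, h]

theorem pv_writeCol_length (gc ic : Int) (a : List (List Char)) (i : Int) (c : Char) :
    (pvWriteCol gc ic a i c).length = a.length := by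
  unfold pvWriteCol
  generalize (PySem.List.pyRange 0 ic 1) = L
  induction L generalizing a with
  | nil => rfl
  | cons s0 L ih => simp only [List.foldl_cons, ih, PySem.List.length_pySetD]

theorem pv_foldl_set_getElem? (gc : Int) (c : Char) (i : Int) :
    ∀ (L : List Int) (a : List (List Char)) (p : Nat),
    (∀ s ∈ L, 0 ≤ i + s * gc ∧ i + s * gc < a.length) →
    (L.foldl (fun a s0 => PySem.List.pySetD a (i + s0 * gc) [c]) a)[p]? =
      if ∃ s ∈ L, (p : Int) = i + s * gc then some [c] else a[p]? := by
  intro L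
  induction L with
  | nil => intro a p _; simp
  | cons s0 L ih =>
    intro a p hb
    have hs0 := hb s0 (by simp)
    have hrest : ∀ s ∈ L, 0 ≤ i + s * gc ∧ i + s * gc < (PySem.List.pySetD a (i + s0 * gc) [c]).length := by
      intro s hs
      rw [PySem.List.length_pySetD]
      exact hb s (by simp [hs])
    simp only [List.foldl_cons]
    rw [ih _ p hrest, pv_setD_getElem? _ _ _ _ hs0.1 hs0.2]
    by_cases h1 : ∃ s ∈ L, (p : Int) = i + s * gc
    · simp [h1]
    · by_cases h2 : (p : Int) = i + s0 * gc <;> simp [h1, h2]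

theorem pv_writeCol_getElem? (gc ic : Int) (a : List (List Char)) (i : Int) (c : Char) (p : Nat)
    (hgc : 0 < gc) (hi : 0 ≤ i) (higc : i < gc)
    (hlen : (a.length : Int) = ic * gc) (hp : p < a.length) :
    (pvWriteCol gc ic a i c)[p]? = if (p : Int) % gc = i then some [c] else a[p]? := by
  unfold pvWriteCol
  rw [pv_foldl_set_getElem? gc c i _ a p]
  · congr 1
    simp only [PySem.List.mem_pyRange_one, eq_iff_iff]
    constructor
    · rintro ⟨s, ⟨hs0, hs1⟩, hps⟩
      rw [hps, Int.add_mul_emod_self_right, Int.emod_eq_of_lt hi higc]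
    · intro hm
      refine ⟨(p : Int) / gc, ⟨Int.ediv_nonneg (by positivity) (by omega), ?_⟩, ?_⟩
      · rw [Int.ediv_lt_iff_lt_mul hgc]
        have : (p : Int) < a.length := by exact_mod_cast hp
        omega
      · have h1 := Int.emod_add_mul_ediv (p : Int) gc
        have h2 : (p : Int) / gc * gc = gc * ((p : Int) / gc) := by ring
        omega
  · intro s hs
    rw [PySem.List.mem_pyRange_one] at hs
    constructor
    · nlinarith
    · nlinarith

theorem pv_writeAll_length (gc ic : Int) (cols : List Char) :
    ∀ (a : List (List Char)) (i : Int), (pvWriteAll gc ic cols a i).length = a.length := by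
  induction cols with
  | nil => intro a i; rfl
  | cons c cs ih => intro a i; rw [pvWriteAll, ih, pv_writeCol_length]

theorem pv_writeAll_getElem? (gc ic : Int) (hgc : 0 < gc) :
    ∀ (cols : List Char) (a : List (List Char)) (i : Int) (p : Nat),
    (a.length : Int) = ic * gc → p < a.length → 0 ≤ i → i + cols.length ≤ gc →
    (pvWriteAll gc ic cols a i)[p]? =
      if i ≤ (p : Int) % gc ∧ (p : Int) % gc < i + cols.length
      then some [cols.getD ((p : Int) % gc - i).toNat ' '] else a[p]? := by
  intro cols
  induction cols with
  | nil =>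
    intro a i p hlen hp hi hle
    simp only [pvWriteAll, List.length_nil]
    rw [if_neg (by omega)]
  | cons c cs ih =>
    intro a i p hlen hp hi hle
    simp only [List.length_cons] at hle
    have hlen1 : ((pvWriteCol gc ic a i c).length : Int) = ic * gc := by
      rw [pv_writeCol_length]; exact hlen
    have hp1 : p < (pvWriteCol gc ic a i c).length := by rw [pv_writeCol_length]; exact hp
    rw [pvWriteAll, ih _ _ p hlen1 hp1 (by omega) (by push_cast at hle ⊢; omega)]
    have hcol := pv_writeCol_getElem? gc ic a i c p hgc hi (by push_cast at hle; omega) hlen hp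
    have hm0 : 0 ≤ (p : Int) % gc := Int.emod_nonneg _ (by omega)
    by_cases h1 : i + 1 ≤ (p : Int) % gc ∧ (p : Int) % gc < i + 1 + (cs.length : Int)
    · rw [if_pos h1, if_pos (by simp only [List.length_cons]; push_cast; omega)]
      have : ((p : Int) % gc - i).toNat = (((p : Int) % gc - (i + 1)).toNat) + 1 := by omega
      rw [this, List.getD_cons_succ]
    · rw [if_neg h1, hcol]
      by_cases h2 : (p : Int) % gc = i
      · rw [if_pos h2, if_pos (by simp only [List.length_cons]; push_cast; omega)]
        have : ((p : Int) % gc - i).toNat = 0 := by omega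
        rw [this, List.getD_cons_zero]
      · rw [if_neg h2, if_neg (by simp only [List.length_cons]; push_cast at h1 ⊢; omega)]

theorem pv_scatter_spec (gc ic : Int) (c : Char) (hic : 0 < ic) :
    ∀ (k f : Nat), k ≤ f → ∀ (a : List (List Char)) (i : Int),
    pvScatter gc ic c f ((k : Int) * ic) a i =
      (pvWriteAll gc ic (List.replicate k c) a i, i + k) := by
  intro k
  induction k with
  | zero =>
    intro f _ a i
    cases f with
    | zero => simp [pvScatter, pvWriteAll]
    | succ f => simp [pvScatter, pvWriteAll]
  | succ k ih =>
    intro f hf a i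
    cases f with
    | zero => omega
    | succ f =>
      rw [pvScatter, if_pos (by push_cast; nlinarith)]
      rw [show (((k + 1 : Nat) : Int) * ic - ic) = (k : Int) * ic by push_cast; ring]
      rw [ih f (by omega)]
      rw [List.replicate_succ, pvWriteAll]
      rw [Prod.mk.injEq]
      exact ⟨rfl, by push_cast; ring⟩

theorem pv_writeAll_append (gc ic : Int) (l1 l2 : List Char) :
    ∀ (a : List (List Char)) (i : Int),
    pvWriteAll gc ic (l1 ++ l2) a i = pvWriteAll gc ic l2 (pvWriteAll gc ic l1 a i) (i + l1.length) := by
  induction l1 with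
  | nil => intro a i; simp [pvWriteAll]
  | cons c cs ih =>
    intro a i
    rw [List.cons_append, pvWriteAll, pvWriteAll, ih]
    congr 1
    simp only [List.length_cons]
    push_cast
    ring

theorem pv_fold_keys (gc ic : Int) (hic : 0 < ic) (g : Char → Int) :
    ∀ (ks : List Char) (a : List (List Char)) (i : Int),
    (∀ c ∈ ks, ic ∣ g c ∧ 0 ≤ g c) →
    ks.foldl (fun (st : List (List Char) × Int) c =>
        pvScatter gc ic c (g c).toNat (g c) st.1 st.2) (a, i)
      = (pvWriteAll gc ic
          (ks.flatMap fun c => List.replicate ((PySem.Int.floordiv (g c) ic).toNat) c) a i,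
         i + ↑(ks.flatMap fun c => List.replicate ((PySem.Int.floordiv (g c) ic).toNat) c).length) := by
  intro ks
  induction ks with
  | nil => intro a i _; simp [pvWriteAll]
  | cons c ks ih =>
    intro a i hall
    obtain ⟨hdvd, hv0⟩ := hall c (by simp)
    set k : Nat := (PySem.Int.floordiv (g c) ic).toNat with hk
    have hfd : PySem.Int.floordiv (g c) ic = g c / ic := PySem.Int.floordiv_eq_ediv_of_pos hic
    have hknn : (k : Int) = g c / ic := by
      rw [hk, hfd]; exact Int.toNat_of_nonneg (Int.ediv_nonneg hv0 (by omega))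
    have hkv : (k : Int) * ic = g c := by rw [hknn]; exact Int.ediv_mul_cancel hdvd
    have hfuel : k ≤ (g c).toNat := by
      have : g c / ic ≤ g c := Int.ediv_le_self _ hv0
      omega
    rw [List.foldl_cons]
    have hsc : pvScatter gc ic c (g c).toNat (g c) a i =
        (pvWriteAll gc ic (List.replicate k c) a i, i + k) := by
      have h := pv_scatter_spec gc ic c hic k (g c).toNat hfuel a i
      rwa [hkv] at h
    rw [hsc, ih _ _ (fun x hx => hall x (by simp [hx]))]
    rw [List.flatMap_cons, pv_writeAll_append]
    rw [Prod.mk.injEq]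
    constructor
    · simp only [List.length_replicate, ← hk]
    · simp only [List.length_append, List.length_replicate]
      push_cast
      omega

theorem pv_sum_div_mul (ic : Int) (cnt : Char → Int) :
    ∀ (ks : List Char), (∀ c ∈ ks, ic ∣ cnt c) →
    (ks.map (fun c => cnt c / ic)).sum * ic = (ks.map cnt).sum := by
  intro ks
  induction ks with
  | nil => intro _; simp
  | cons c ks ih =>
    intro h
    simp only [List.map_cons, List.sum_cons, add_mul]
    rw [ih (fun x hx => h x (by simp [hx])), Int.ediv_mul_cancel (h c (by simp))]

theorem pv_main (cs : List Char) (K : Int) (hcs : cs ≠ []) :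
    kPeriodic (String.ofList cs) K = kPeriodic_alt (String.ofList cs) K := by
  have htl : (String.ofList cs).toList = cs := by simp
  simp only [kPeriodic, kPeriodic_alt, htl]
  set n : Int := (cs.length : Int) with hn
  set fre := PySem.Dict.counter cs with hfre
  set gc : Int := ((Int.gcd n K : Nat) : Int) with hgc
  set ic : Int := PySem.Int.floordiv n gc with hic
  have hn0 : 0 < n := by rw [hn]; exact_mod_cast List.length_pos_iff.mpr hcs
  have hgc0 : 0 < gc := by
    rw [hgc, hn]
    have : 0 < Int.gcd (cs.length : Int) K := by
      rw [Int.gcd_pos_iff]; left; simpa using hcs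
    exact_mod_cast this
  have hdvdn : gc ∣ n := by rw [hgc]; exact Int.gcd_dvd_left ..
  have hicdiv : ic = n / gc := by rw [hic]; exact PySem.Int.floordiv_eq_ediv_of_pos hgc0
  have hic0 : 0 < ic := by
    rw [hicdiv]
    have h1 : gc ≤ n := Int.le_of_dvd hn0 hdvdn
    have := Int.ediv_le_ediv hgc0 h1
    rwa [Int.ediv_self (by omega)] at this
  have hmuln : ic * gc = n := by rw [hicdiv]; exact Int.ediv_mul_cancel hdvdn
  -- the two validation tests agree
  have hcond : (fre.items).any (fun kv => decide (0 < PySem.Int.mod kv.2 ic))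
      = (fre.values).any (fun v => PySem.Int.mod v ic != 0) := by
    show _ = ((fre.items).map (fun x => x.2)).any (fun v => PySem.Int.mod v ic != 0)
    rw [List.any_map]
    congr 1
    funext kv
    have h0 := PySem.Int.mod_nonneg kv.2 hic0
    simp only [Function.comp]
    by_cases h : PySem.Int.mod kv.2 ic = 0
    · simp [h]
    · simp [h, show 0 < PySem.Int.mod kv.2 ic by omega]
  rw [← hcond]
  by_cases hA : (fre.items).any (fun kv => decide (0 < PySem.Int.mod kv.2 ic)) = true
  · rw [if_pos hA, if_pos hA]
  · rw [if_neg hA, if_neg hA]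
    set ks := PySem.List.sorted fre.keys (fun c => c) false with hks
    set f : Char → List Char :=
      fun c => List.replicate (PySem.Int.floordiv (fre.getD c 0) ic).toNat c with hf
    set colsA : List Char := ks.flatMap f with hcolsA
    have hgetD : ∀ c, fre.getD c 0 = ((cs.count c : Nat) : Int) := by
      intro c; rw [hfre]; exact PySem.Dict.getD_counter cs c
    have hkeys : fre.keys = PySem.List.dedup cs := by
      rw [hfre, PySem.Dict.keys_counter, PySem.List.dedup_eq_ofList]
    have hperm : ks.Perm cs.dedup := by
      refine (PySem.List.sorted_perm fre.keys (fun c => c) false).trans ?_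
      rw [hkeys]
      refine (List.perm_ext_iff_of_nodup (PySem.List.nodup_dedup cs) cs.nodup_dedup).mpr ?_
      intro x
      rw [PySem.List.mem_dedup, List.mem_dedup]
    have hAmem : ∀ kv ∈ fre.items, ¬ 0 < PySem.Int.mod kv.2 ic := by
      simpa using hA
    have hdvd : ∀ c ∈ ks, ic ∣ fre.getD c 0 ∧ 0 ≤ fre.getD c 0 := by
      intro c hc
      have hck : c ∈ fre.keys := by
        rw [hks, PySem.List.mem_sorted] at hc; exact hc
      have hitem : (c, ((cs.count c : Nat) : Int)) ∈ fre.items := by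
        rw [hfre, PySem.Dict.items_counter]
        exact List.mem_map.mpr ⟨c, by rwa [hfre, PySem.Dict.keys_counter] at hck, rfl⟩
      have hm := hAmem _ hitem
      dsimp only at hm
      rw [← hgetD c] at hm
      have h0 := PySem.Int.mod_nonneg (fre.getD c 0) hic0
      have hz : PySem.Int.mod (fre.getD c 0) ic = 0 := by omega
      rw [PySem.Int.mod_eq_zero_iff_dvd] at hz
      refine ⟨hz, ?_⟩
      rw [hgetD c]; positivity
    -- B's column table is A's flat scatter order
    rw [PySem.List.foldl_append_eq_flatMap f ks [], List.nil_append, ← hcolsA]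
    -- A's fold = pvWriteAll
    rw [pv_fold_keys gc ic hic0 (fun c => fre.getD c 0) ks _ 0 hdvd]
    -- length of the column table
    have hlensum : colsA.length = (ks.map (fun c => ((fre.getD c 0) / ic).toNat)).sum := by
      rw [hcolsA, List.length_flatMap]
      exact congrArg List.sum (List.map_congr_left (fun c _ => by
        simp [hf, PySem.Int.floordiv_eq_ediv_of_pos hic0]))
    have hcastsum : ((ks.map (fun c => ((fre.getD c 0) / ic).toNat)).sum : Int)
        = (ks.map (fun c => (fre.getD c 0) / ic)).sum := by
      rw [Nat.cast_list_sum, List.map_map]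
      exact congrArg List.sum (List.map_congr_left (fun c _ =>
        Int.toNat_of_nonneg (Int.ediv_nonneg (by rw [hgetD c]; positivity) (by omega))))
    have hsumcnt : (ks.map (fun c => fre.getD c 0)).sum = n := by
      have hnat : (ks.map (fun c => cs.count c)).sum = cs.length := by
        rw [List.Perm.sum_eq (hperm.map (fun c => cs.count c))]
        exact List.sum_map_count_dedup_eq_length cs
      have : (ks.map (fun c => fre.getD c 0)).sum
          = ((ks.map (fun c => cs.count c)).sum : Int) := by
        rw [Nat.cast_list_sum, List.map_map]
        exact congrArg List.sum (List.map_congr_left (fun c _ => hgetD c))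
      rw [this, hnat, hn]
    have hlen : (colsA.length : Int) = gc := by
      have h1 : (colsA.length : Int) * ic = n := by
        rw [hlensum, hcastsum, pv_sum_div_mul ic _ ks (fun c hc => (hdvd c hc).1), hsumcnt]
      have h2 : gc * ic = n := by rw [mul_comm]; exact hmuln
      have := h1.trans h2.symm
      exact mul_right_cancel₀ (by omega) this
    -- pointwise description of A's answer array
    have hRlen : ((List.replicate cs.length ([] : List Char)).length : Int) = ic * gc := by
      rw [List.length_replicate, ← hn, hmuln]
    set ansA := pvWriteAll gc ic colsA (List.replicate cs.length []) 0 with hansA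
    have hansAlen : ansA.length = cs.length := by
      rw [hansA, pv_writeAll_length, List.length_replicate]
    have hansEq : ansA = (PySem.List.pyRange 0 n 1).map
        (fun q => [PySem.List.pyGetD colsA (PySem.Int.mod q gc) ' ']) := by
      apply List.ext_getElem?
      intro p
      rw [List.getElem?_map, PySem.List.getElem?_pyRange_one]
      by_cases hp : p < cs.length
      · have hm0 : 0 ≤ (p : Int) % gc := Int.emod_nonneg _ (by omega)
        have hm1 : (p : Int) % gc < gc := Int.emod_lt_of_pos _ hgc0
        rw [hansA, pv_writeAll_getElem? gc ic hgc0 colsA _ 0 p hRlen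
          (by rwa [List.length_replicate]) le_rfl (by rw [hlen]; omega)]
        rw [if_pos (by constructor <;> omega)]
        rw [if_pos (by rw [hn]; omega)]
        simp only [Option.map_some, Option.some.injEq]
        have hmod : PySem.Int.mod (0 + (p : Int)) gc = (p : Int) % gc := by
          rw [zero_add]; exact PySem.Int.mod_eq_emod_of_pos hgc0
        rw [hmod, PySem.List.pyGetD_eq_getElem colsA ' ' hm0 (by omega)]
        rw [List.getD_eq_getElem colsA ' ' (by omega)]
        congr 2
      · rw [List.getElem?_eq_none (by rw [hansAlen]; omega)]
        rw [if_neg (by rw [hn]; omega)]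
        rfl
    rw [hansEq]
    congr 1
    generalize (PySem.List.pyRange 0 n 1) = L
    induction L with
    | nil => rfl
    | cons q L ih =>
      simp only [List.map_cons, List.flatten_cons, List.singleton_append, ih]

-- ===== VERDICT (by name: the statement is the Claim_ definition above) =====
theorem kPeriodic_spec : Claim_equal_kPeriodic := by
  unfold Claim_equal_kPeriodic
  intro s K _ _
  unfold Spec_kPeriodic
  by_cases hcs : s.toList = []
  · rw [String.toList_eq_nil_iff.mp hcs]
    rfl
  · have h := pv_main s.toList K hcs
    rwa [show String.ofList s.toList = s by simp] at h
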